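-- pv_equiv track=rewrite | github.com/michaelIf/likou | 数组/有序数组中出现次数超过25%的元素.py | way3
-- ===== SOURCE A (Python) =====
-- def way3(arr):
--     n = len(arr)
--     cur, cnt = arr[0], 0
--     for i in range(n):
--         if arr[i] == cur:
--             cnt += 1
--             if cnt * 4 > n:
--                 return cur
--         else:
--             cur, cnt = arr[i], 1
--     return -1
-- ===== SOURCE B (Python) =====
-- def way3(arr):
--     n = len(arr)
--     # phase 1: run-length encode the array
--     runs = []
--     cur = None
--     for x in arr:
--         if cur is not None and cur[0] == x:
--             cur = (x, cur[1] + 1)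
--         else:
--             if cur is not None:
--                 runs.append(cur)
--             cur = (x, 1)
--     if cur is not None:
--         runs.append(cur)
--     # phase 2: first run longer than a quarter of the array
--     for v, c in runs:
--         if c * 4 > n:
--             return v
--     return -1
-- ===== Notes on version B (the rewrite author's own statement) =====
-- stated objective: alternative
-- what changed: B first builds an explicit run-length encoding of the array in one fold and then scans the runs for the first one longer than n/4, instead of A's single loop with an inline run counter and mid-loop early return.
import Mathlib
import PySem

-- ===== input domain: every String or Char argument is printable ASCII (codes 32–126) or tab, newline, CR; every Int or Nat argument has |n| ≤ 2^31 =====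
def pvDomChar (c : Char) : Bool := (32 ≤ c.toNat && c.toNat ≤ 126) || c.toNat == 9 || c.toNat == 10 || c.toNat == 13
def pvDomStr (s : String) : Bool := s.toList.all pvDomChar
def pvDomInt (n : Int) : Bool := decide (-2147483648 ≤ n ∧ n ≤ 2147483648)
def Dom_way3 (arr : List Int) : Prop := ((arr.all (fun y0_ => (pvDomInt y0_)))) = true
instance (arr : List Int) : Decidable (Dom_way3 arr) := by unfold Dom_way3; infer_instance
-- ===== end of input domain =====

-- B replaces A's inline run counter with an explicit run-length encoding built in one
-- fold, then a scan of the runs for the first one longer than n/4 (objective: alternative).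

-- ===== PORT A =====
-- A's 'for i in range(n)' indexes arr[i] for i = 0..n-1 in order; it is transcribed as
-- structural recursion over arr carrying the same (cur, cnt) state, branches in order.
def way3Go (n : Int) (cur cnt : Int) : List Int → Int
  | [] => -1
  | x :: xs =>
    if x = cur then
      if (cnt + 1) * 4 > n then cur
      else way3Go n cur (cnt + 1) xs
    else way3Go n x 1 xs

def way3 (arr : List Int) : Int :=
  match PySem.List.pyGet? arr 0 with
  | none => 0        -- IndexError on the empty list; excluded by Pre_way3
  | some c => way3Go (arr.length : Int) c 0 arr

-- ===== PORT B =====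
-- one fold step of Source B's run-building loop: state = (current run, finished runs)
def bStep (st : Option (Int × Int) × List (Int × Int)) (x : Int) :
    Option (Int × Int) × List (Int × Int) :=
  match st with
  | (some (v, c), runs) =>
    if v = x then (some (x, c + 1), runs) else (some (x, 1), runs ++ [(v, c)])
  | (none, runs) => (some (x, 1), runs)

-- Source B's second loop: first run with c * 4 > n, else -1
def pickRun (n : Int) : List (Int × Int) → Int
  | [] => -1
  | (v, c) :: rest => if c * 4 > n then v else pickRun n rest

def way3_alt (arr : List Int) : Int :=
  let n : Int := arr.length
  let st := arr.foldl bStep (none, [])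
  let runs := match st.1 with
    | some p => st.2 ++ [p]
    | none => st.2
  pickRun n runs

-- ===== PRECONDITION & SPEC =====
-- A reads the first element before its loop, so it raises IndexError exactly on the empty list.
def Pre_way3 (arr : List Int) : Prop := arr ≠ []
instance (arr : List Int) : Decidable (Pre_way3 arr) := by unfold Pre_way3; infer_instance
def pvWitness_way3 : List Int := ([1, 1, 2])

def Spec_way3 (arr : List Int) (out : Int) : Prop := out = way3_alt arr
instance (arr : List Int) (out : Int) : Decidable (Spec_way3 arr out) := by unfold Spec_way3; infer_instance

-- ===== CLAIM (what is proved, stated in full; the proofs are below) =====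
def Claim_equal_way3 : Prop := ∀ (arr : List Int), Dom_way3 arr → Pre_way3 arr → Spec_way3 arr (way3 arr)

-- ===== LEMMAS AND PROOFS =====

-- proof-side characterisation: the run-length encoding as structural recursion
def mergeRun (v c : Int) (l : List (Int × Int)) : List (Int × Int) :=
  match l with
  | [] => [(v, c)]
  | (w, d) :: rest => if w = v then (v, c + d) :: rest else (v, c) :: (w, d) :: rest

def rle : List Int → List (Int × Int)
  | [] => []
  | x :: xs => mergeRun x 1 (rle xs)

def finalizeB (st : Option (Int × Int) × List (Int × Int)) : List (Int × Int) :=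
  match st.1 with
  | some p => st.2 ++ [p]
  | none => st.2

lemma mergeRun_merge (v c : Int) (l : List (Int × Int)) :
    mergeRun v c (mergeRun v 1 l) = mergeRun v (c + 1) l := by
  cases l with
  | nil => simp [mergeRun]
  | cons p rest =>
    obtain ⟨w, d⟩ := p
    by_cases h : w = v <;> simp [mergeRun, h] <;> omega

lemma mergeRun_ne (v c x : Int) (h : x ≠ v) (l : List (Int × Int)) :
    mergeRun v c (mergeRun x 1 l) = (v, c) :: mergeRun x 1 l := by
  cases l with
  | nil => simp [mergeRun, h]
  | cons p rest =>
    obtain ⟨w, d⟩ := p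
    by_cases hw : w = x <;> simp [mergeRun, hw, h]

lemma rle_head_pos : ∀ (xs : List Int) (w d : Int) (rest : List (Int × Int)),
    rle xs = (w, d) :: rest → 1 ≤ d := by
  intro xs
  induction xs with
  | nil => intro w d rest h; simp [rle] at h
  | cons x xs ih =>
    intro w d rest h
    simp only [rle] at h
    cases hr : rle xs with
    | nil => rw [hr] at h; simp [mergeRun] at h; omega
    | cons p r =>
      obtain ⟨w', d'⟩ := p
      rw [hr] at h
      by_cases hw : w' = x
      · simp [mergeRun, hw] at h
        have := ih w' d' r hr
        omega
      · simp [mergeRun, hw] at h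
        omega

-- pick on a merged-head list returns v once the head already qualifies
lemma pick_mergeRun_head (n v c : Int) (l : List (Int × Int))
    (hl : ∀ w d rest, l = (w, d) :: rest → 1 ≤ d) (h : c * 4 > n) :
    pickRun n (mergeRun v c l) = v := by
  cases l with
  | nil => simp [mergeRun, pickRun]; omega
  | cons p rest =>
    obtain ⟨w, d⟩ := p
    have hd : 1 ≤ d := hl w d rest rfl
    by_cases hw : w = v <;> simp [mergeRun, hw, pickRun] <;> omega

-- B's fold builds exactly the run-length encoding
lemma foldB : ∀ (xs : List Int) (v c : Int) (runs : List (Int × Int)),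
    finalizeB (xs.foldl bStep (some (v, c), runs)) = runs ++ mergeRun v c (rle xs) := by
  intro xs
  induction xs with
  | nil => intro v c runs; simp [finalizeB, mergeRun, rle]
  | cons x xs ih =>
    intro v c runs
    simp only [List.foldl, bStep]
    by_cases h : v = x
    · subst h
      simp [ih, rle, mergeRun_merge]
    · simp only [if_neg h, ih, rle]
      rw [mergeRun_ne v c x (fun hx => h hx.symm)]
      simp

lemma way3_alt_eq_pick (a : Int) (xs : List Int) :
    way3_alt (a :: xs) = pickRun ((a :: xs).length : Int) (rle (a :: xs)) := by
  have h := foldB xs a 1 []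
  simp only [way3_alt, List.foldl, bStep]
  simp only [finalizeB] at h
  simp only [rle]
  cases hst : (xs.foldl bStep (some (a, 1), ([] : List (Int × Int)))).1 with
  | none => rw [hst] at h; simp at h ⊢; rw [h]
  | some p => rw [hst] at h; simp at h ⊢; rw [h]

-- A's loop agrees with picking from the run-length encoding (n ≥ 4 case)
lemma go_pick (n : Int) (hn : 4 ≤ n) : ∀ (xs : List Int) (v c : Int),
    1 ≤ c → c * 4 ≤ n → way3Go n v c xs = pickRun n (mergeRun v c (rle xs)) := by
  intro xs
  induction xs with
  | nil => intro v c _ hc; simp [way3Go, rle, mergeRun, pickRun]; omega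
  | cons x xs ih =>
    intro v c hc1 hc
    by_cases hx : x = v
    · subst hx
      by_cases hq : (c + 1) * 4 > n
      · have h1 : way3Go n x c (x :: xs) = x := by simp [way3Go, hq]
        rw [h1]
        simp only [rle, mergeRun_merge]
        exact (pick_mergeRun_head n x (c + 1) (rle xs)
          (fun w d rest h => rle_head_pos xs w d rest h) (by omega)).symm
      · have h1 : way3Go n x c (x :: xs) = way3Go n x (c + 1) xs := by simp [way3Go, hq]
        rw [h1]
        simp only [rle, mergeRun_merge]
        exact ih x (c + 1) (by omega) (by omega)
    · have h1 : way3Go n v c (x :: xs) = way3Go n x 1 xs := by simp [way3Go, hx]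
      rw [h1]
      simp only [rle]
      rw [mergeRun_ne v c x hx]
      simp only [pickRun, if_neg (show ¬ c * 4 > n by omega)]
      exact ih x 1 (by omega) (by omega)

-- ===== VERDICT (by name: the statement is the Claim_ definition above) =====
theorem way3_spec : Claim_equal_way3 := by
  intro arr _ hpre
  unfold Spec_way3
  cases arr with
  | nil => exact absurd rfl hpre
  | cons a xs =>
    rw [way3_alt_eq_pick]
    have hget : way3 (a :: xs) = way3Go ((a :: xs).length : Int) a 0 (a :: xs) := by
      simp [way3, PySem.List.pyGet?, PySem.List.pyIdx?]
    rw [hget]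
    set n : Int := ((a :: xs).length : Int) with hn
    have hn1 : 1 ≤ n := by simp [hn]
    by_cases h4 : 4 ≤ n
    · have hstep : way3Go n a 0 (a :: xs) = way3Go n a 1 xs := by
        simp [way3Go]
        intro h
        exact absurd h (by omega)
      rw [hstep, go_pick n h4 xs a 1 (by omega) (by omega)]
      simp only [rle]
    · have hstep : way3Go n a 0 (a :: xs) = a := by
        simp [way3Go]
        intro h
        exact absurd h4 (by omega)
      rw [hstep]
      simp only [rle]
      exact (pick_mergeRun_head n a 1 (rle xs)
        (fun w d rest h => rle_head_pos xs w d rest h) (by omega)).symm
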